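-- pv_equiv track=rewrite | github.com/MathsPrograms/RTYM_problem10 | Program.py | item4
-- ===== SOURCE A (Python) =====
-- def item4(divider):
--     t = False
--     for num in range(100, 1000):
--         k = False
--         for numadd1 in range(10):
--             for numadd2 in range(1, 10):
--                 if (num * 10 + numadd1 + numadd2 * 10000) % divider == 0:
--                     k = True
--         if k == False:
--             t = True
--     if t == True:
--         return True
--     else:
--         return False
-- ===== SOURCE B (Python) =====
-- def item4(divider):
--     residues = {(numadd1 + numadd2 * 10000) % divider
--                 for numadd1 in range(10) for numadd2 in range(1, 10)}
--     return any((-num * 10) % divider not in residues for num in range(100, 1000))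
-- ===== Notes on version B (the rewrite author's own statement) =====
-- stated objective: faster
-- what changed: Builds the 90 residues (a + b*10000) % divider once as a set, then scans num = 100..999 testing whether (-num*10) % divider is missing from it, replacing the 900x90 nested modular scan with one table build plus a 900-element membership pass.
import Mathlib
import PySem

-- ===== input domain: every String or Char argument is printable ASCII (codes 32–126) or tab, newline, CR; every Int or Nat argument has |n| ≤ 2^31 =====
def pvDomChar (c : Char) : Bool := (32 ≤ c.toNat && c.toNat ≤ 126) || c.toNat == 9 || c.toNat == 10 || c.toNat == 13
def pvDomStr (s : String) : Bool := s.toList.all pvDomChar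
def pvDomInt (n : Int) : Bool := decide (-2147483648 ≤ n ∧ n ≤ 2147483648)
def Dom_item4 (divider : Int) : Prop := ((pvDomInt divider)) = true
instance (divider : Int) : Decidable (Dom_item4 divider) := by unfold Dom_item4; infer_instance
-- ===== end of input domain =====

-- B builds the 90 residues (a + b*10000) % divider once as a set and then makes a single
-- 900-element membership pass, instead of A's 900×90 nested modular scan.

-- ===== PORT A =====
def item4 (divider : Int) : Bool :=
  let t := (PySem.List.pyRange 100 1000 1).foldl (fun t num =>
    let k := (PySem.List.pyRange 0 10 1).foldl (fun k numadd1 =>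
      (PySem.List.pyRange 1 10 1).foldl (fun k numadd2 =>
        if PySem.Int.mod (num * 10 + numadd1 + numadd2 * 10000) divider = 0 then true else k) k) false
    if k = false then true else t) false
  if t = true then true else false

-- ===== PORT B =====
def item4_alt (divider : Int) : Bool :=
  let residues : PySem.Set Int := PySem.Set.ofList
    ((PySem.List.pyRange 0 10 1).flatMap (fun numadd1 =>
      (PySem.List.pyRange 1 10 1).map (fun numadd2 =>
        PySem.Int.mod (numadd1 + numadd2 * 10000) divider)))
  (PySem.List.pyRange 100 1000 1).any (fun num =>
    !(PySem.Set.contains residues (PySem.Int.mod (-num * 10) divider)))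

-- ===== PRECONDITION & SPEC =====
-- Pre_ excludes divider = 0, where Python A raises ZeroDivisionError (B raises there too).
def Pre_item4 (divider : Int) : Prop := divider ≠ 0
instance (divider : Int) : Decidable (Pre_item4 divider) := by unfold Pre_item4; infer_instance
def pvWitness_item4 : Int := 7

def Spec_item4 (divider : Int) (out : Bool) : Prop := out = item4_alt divider
instance (divider : Int) (out : Bool) : Decidable (Spec_item4 divider out) := by unfold Spec_item4; infer_instance

-- ===== CLAIM (what is proved, stated in full; the proofs are below) =====
def Claim_equal_item4 : Prop := ∀ (divider : Int), Dom_item4 divider → Pre_item4 divider → Spec_item4 divider (item4 divider)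

-- ===== LEMMAS AND PROOFS =====

-- A's "if cond: flag = True" loop shape: the final flag is the initial flag OR any hit.
theorem foldl_flag_or {α : Type} (p : α → Prop) [DecidablePred p] (l : List α) (b : Bool) :
    l.foldl (fun k x => if p x then true else k) b = (b || l.any (fun x => decide (p x))) := by
  induction l generalizing b with
  | nil => simp
  | cons x xs ih =>
      simp only [List.foldl_cons, List.any_cons, ih]
      by_cases h : p x <;> simp [h]

-- Middle-loop shape after the inner rewrite: threading the flag through '||'.
theorem foldl_or {α : Type} (f : α → Bool) (l : List α) (b : Bool) :
    l.foldl (fun k x => (k || f x)) b = (b || l.any f) := by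
  induction l generalizing b with
  | nil => simp
  | cons x xs ih => simp [ih, Bool.or_assoc]

-- Python-mod congruence: equal remainders iff the divisor divides the difference.
theorem pymod_eq_iff_dvd_sub (a c d : Int) (hd : d ≠ 0) :
    PySem.Int.mod a d = PySem.Int.mod c d ↔ d ∣ (a - c) := by
  have ha := PySem.Int.floordiv_mul_add_mod a d
  have hc := PySem.Int.floordiv_mul_add_mod c d
  constructor
  · intro h
    exact ⟨PySem.Int.floordiv a d - PySem.Int.floordiv c d, by linear_combination -ha + hc + h⟩
  · rintro ⟨q, hq⟩
    have key : PySem.Int.mod a d - PySem.Int.mod c d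
        = d * (q - PySem.Int.floordiv a d + PySem.Int.floordiv c d) := by
      linear_combination ha - hc + hq
    set r := q - PySem.Int.floordiv a d + PySem.Int.floordiv c d with hr
    have hr0 : r = 0 := by
      rcases lt_or_gt_of_ne hd with hneg | hpos
      · have b1 := PySem.Int.mod_neg_bounds a hneg
        have b2 := PySem.Int.mod_neg_bounds c hneg
        by_contra h0
        rcases lt_or_gt_of_ne h0 with h1 | h1 <;> nlinarith
      · have b1 := PySem.Int.mod_nonneg a hpos
        have b2 := PySem.Int.mod_lt a hpos
        have b3 := PySem.Int.mod_nonneg c hpos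
        have b4 := PySem.Int.mod_lt c hpos
        by_contra h0
        rcases lt_or_gt_of_ne h0 with h1 | h1 <;> nlinarith
    rw [hr0, mul_zero] at key
    omega

-- Membership in set(L) is membership in L (stated abstractly so rw never evaluates L).
theorem contains_ofList {x : Int} {l : List Int} :
    PySem.Set.contains (PySem.Set.ofList l) x = l.contains x := by
  simp [PySem.Set.contains, PySem.Set.mem_ofList, List.contains_eq_mem]

-- Per-num bridge: some (a, b) pair hits remainder 0 in A iff B's probe residue occurs
-- among the precomputed residues.
theorem per_num_bridge (divider num : Int) (hd : divider ≠ 0) :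
    ((PySem.List.pyRange 0 10 1).any (fun a =>
      (PySem.List.pyRange 1 10 1).any (fun b =>
        decide (PySem.Int.mod (num * 10 + a + b * 10000) divider = 0))))
    = ((PySem.List.pyRange 0 10 1).flatMap (fun a =>
        (PySem.List.pyRange 1 10 1).map (fun b =>
          PySem.Int.mod (a + b * 10000) divider))).contains
        (PySem.Int.mod (-num * 10) divider) := by
  rw [Bool.eq_iff_iff]
  simp only [List.any_eq_true, List.contains_eq_mem, decide_eq_true_eq, List.mem_flatMap,
    List.mem_map]
  constructor
  · rintro ⟨a, ha, b, hb, h⟩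
    refine ⟨a, ha, b, hb, ?_⟩
    rw [pymod_eq_iff_dvd_sub _ _ _ hd]
    rw [PySem.Int.mod_eq_zero_iff_dvd] at h
    have e : a + b * 10000 - -num * 10 = num * 10 + a + b * 10000 := by ring
    rw [e]; exact h
  · rintro ⟨a, ha, b, hb, h⟩
    refine ⟨a, ha, b, hb, ?_⟩
    rw [pymod_eq_iff_dvd_sub _ _ _ hd] at h
    rw [PySem.Int.mod_eq_zero_iff_dvd]
    have e : a + b * 10000 - -num * 10 = num * 10 + a + b * 10000 := by ring
    rw [e] at h; exact h

-- ===== VERDICT (by name: the statement is the Claim_ definition above) =====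
theorem item4_spec : Claim_equal_item4 := by
  intro divider _ hpre
  unfold Spec_item4 item4 item4_alt
  simp only [foldl_flag_or, foldl_or, Bool.false_or, Bool.decide_eq_false]
  rw [show ∀ b : Bool, (if b = true then true else false) = b from by decide]
  apply PySem.List.any_congr_mem
  intro num _
  rw [contains_ofList, ← per_num_bridge divider num hpre]
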